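-- pv_equiv track=rewrite | github.com/DReamLS/file_scanning | models/miner.py | merge_similar_lines_and_choose_longest
-- ===== SOURCE A (Python) =====
-- def merge_similar_lines_and_choose_longest(lines, axis, threshold=10):
--     if len(lines) == 0:
--         return []
--
--     # 首先根据line[axis]排序，以便后续分组
--     sorted_lines = sorted(lines, key=lambda line: line[1-axis])
--
--     def process_group(group):
--         longest_line = max(group, key=lambda l: abs(l[2+axis] - l[axis]))
--         merged = []
--         remaining = []
--         temp = {}
--         temp[axis] = longest_line[axis]
--         temp[2+axis] = longest_line[2+axis]
--         for line in group:
--             if line != longest_line: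
--                 if (longest_line[axis]-10 <= line[axis] <= longest_line[axis+2]+10) or \
--                    (longest_line[axis]-10 <= line[axis+2] <= longest_line[axis+2]+10):
--                     merged.append(line)
--                 else:
--                     remaining.append(line)
--
--         # 如果merged不为空，则合并这些线条（这里简单地选择最长线代表合并结果）
--         if merged:
--             for mline in merged:
--                 if mline[axis]<temp[axis]: temp[axis] = mline[axis]
--                 if mline[2+axis]>temp[2+axis]: temp[2+axis] = mline[2+axis]
--             if axis == 0:
--                 result = [(temp[axis],longest_line[1-axis],temp[axis+2],longest_line[1-axis])]
--             else:
--                 result = [(longest_line[1-axis],temp[axis],longest_line[1-axis],temp[axis+2])]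
--
--
--         else:
--             result = []
--
--         # 对剩余的线条递归处理
--         if remaining:
--             result.extend(process_group(remaining))
--
--         return result
--
--     # 分组并处理每个组
--     groups = []
--     current_group = []
--     last_center = None
--
--     for line in sorted_lines:
--         center = line[1-axis]
--         if last_center is not None and abs(center - last_center) > threshold:
--             if current_group:
--                 groups.append(current_group)
--                 current_group = []
--         current_group.append(line)
--         last_center = center
--
--     if current_group:  # 最后一组
--         groups.append(current_group)
--
--     merged_lines = []
--     for group in groups:
--         merged_lines.extend(process_group(group))
--
--     # 处理合并后的直线，使其成为标准形式
--     straight_lines = []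
--     for line in merged_lines:
--         x0, y0, x1, y1 = line
--         if axis == 0:  # 水平线
--             avg_y = (y0 + y1) // 2
--             straight_lines.append((x0, avg_y, x1, avg_y))
--         elif axis == 1:  # 垂直线
--             avg_x = (x0 + x1) // 2
--             straight_lines.append((avg_x, y0, avg_x, y1))
--
--     return straight_lines
-- ===== SOURCE B (Python) =====
-- def _groups(sorted_lines, c, threshold):
--     # split the center-sorted list where the gap between consecutive centers exceeds threshold
--     groups = []
--     i = 0
--     n = len(sorted_lines)
--     while i < n:
--         j = i + 1
--         while j < n and abs(sorted_lines[j][c] - sorted_lines[j - 1][c]) <= threshold: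
--             j += 1
--         groups.append(sorted_lines[i:j])
--         i = j
--     return groups
--
--
-- def merge_similar_lines_and_choose_longest(lines, axis, threshold=10):
--     if not lines:
--         return []
--     c = 1 - axis
--     out = []
--     for group in _groups(sorted(lines, key=lambda l: l[c]), c, threshold):
--         work = group
--         while work:
--             seed = max(work, key=lambda l: abs(l[2 + axis] - l[axis]))
--             others = [l for l in work if l != seed]
--             lo, hi = seed[axis], seed[2 + axis]
--             ok = lambda v: lo - 10 <= v <= hi + 10
--             merged = [l for l in others if ok(l[axis]) or ok(l[axis + 2])]
--             if merged:
--                 a = min([lo] + [l[axis] for l in merged])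
--                 b = max([hi] + [l[2 + axis] for l in merged])
--                 m = seed[c]
--                 out.append((a, m, b, m) if axis == 0 else (m, a, m, b))
--             work = [l for l in others if not (ok(l[axis]) or ok(l[axis + 2]))]
--     return out
-- ===== Notes on version B (the rewrite author's own statement) =====
-- stated objective: simpler
-- what changed: Recursive process_group becomes an iterative worklist loop with comprehension-based partitioning and min/max over lists, grouping is done by an index scan over the sorted list instead of a stateful flush-on-gap fold, and the final straightening pass is dropped because every emitted segment already has both center coordinates equal so averaging is a no-op.
-- outside the precondition, e.g. on merge_similar_lines_and_choose_longest([(0, 0, 1, 0), (0, 0, 2, 0)], -1, 10): A returns [], B returns [(1, 0, 1, 0)]; on merge_similar_lines_and_choose_longest([(0, 0, 1, 0), (0, 0, 2, 0)], -2, 10): A returns [], B returns [(0, 1, 0, 0)]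
import Mathlib
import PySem

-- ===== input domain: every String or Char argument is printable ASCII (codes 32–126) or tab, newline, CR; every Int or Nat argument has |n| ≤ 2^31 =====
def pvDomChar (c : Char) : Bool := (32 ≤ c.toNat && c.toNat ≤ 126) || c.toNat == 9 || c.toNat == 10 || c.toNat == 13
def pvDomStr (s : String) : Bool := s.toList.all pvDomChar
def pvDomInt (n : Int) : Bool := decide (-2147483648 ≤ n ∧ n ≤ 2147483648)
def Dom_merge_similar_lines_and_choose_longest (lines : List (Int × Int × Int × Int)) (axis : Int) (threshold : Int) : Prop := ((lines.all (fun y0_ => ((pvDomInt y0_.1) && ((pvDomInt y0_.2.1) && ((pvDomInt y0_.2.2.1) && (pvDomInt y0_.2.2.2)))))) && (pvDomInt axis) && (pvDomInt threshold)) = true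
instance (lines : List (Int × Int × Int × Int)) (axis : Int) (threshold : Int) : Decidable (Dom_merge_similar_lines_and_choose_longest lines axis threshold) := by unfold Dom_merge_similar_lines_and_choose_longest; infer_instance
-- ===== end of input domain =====

-- B drops A's final straightening pass (a no-op: emitted segments already have equal center
-- coordinates), replaces the recursive process_group by an iterative worklist with
-- comprehension-style partitioning and min/max over lists, and groups by an index scan.

-- tuple indexing, exact for Python indices 0..3 (the only ones reached under Pre_, axis ∈ {0,1})
def pvIdx (l : Int × Int × Int × Int) (i : Int) : Int :=
  if i = 0 then l.1 else if i = 1 then l.2.1 else if i = 2 then l.2.2.1 else l.2.2.2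

-- ===== PORT A =====

-- the body of A's partition loop over `group` (merged/remaining accumulators)
def pvPartStep (axis : Int) (longest : Int × Int × Int × Int)
    (mr : List (Int × Int × Int × Int) × List (Int × Int × Int × Int))
    (line : Int × Int × Int × Int) :
    List (Int × Int × Int × Int) × List (Int × Int × Int × Int) :=
  if line ≠ longest then
    if (pvIdx longest axis - 10 ≤ pvIdx line axis ∧ pvIdx line axis ≤ pvIdx longest (axis + 2) + 10)
       ∨ (pvIdx longest axis - 10 ≤ pvIdx line (axis + 2) ∧ pvIdx line (axis + 2) ≤ pvIdx longest (axis + 2) + 10)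
    then (mr.1 ++ [line], mr.2) else (mr.1, mr.2 ++ [line])
  else mr

-- characterisation of the partition loop (also gives procA/procB their termination measure)
theorem pvPartStep_foldl (axis : Int) (longest : Int × Int × Int × Int) :
    ∀ (xs : List (Int × Int × Int × Int)) (m r : List (Int × Int × Int × Int)),
    xs.foldl (pvPartStep axis longest) (m, r) =
      (m ++ (xs.filter (fun l => l ≠ longest)).filter (fun l =>
          decide ((pvIdx longest axis - 10 ≤ pvIdx l axis ∧ pvIdx l axis ≤ pvIdx longest (axis + 2) + 10)
            ∨ (pvIdx longest axis - 10 ≤ pvIdx l (axis + 2) ∧ pvIdx l (axis + 2) ≤ pvIdx longest (axis + 2) + 10))),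
       r ++ (xs.filter (fun l => l ≠ longest)).filter (fun l =>
          !decide ((pvIdx longest axis - 10 ≤ pvIdx l axis ∧ pvIdx l axis ≤ pvIdx longest (axis + 2) + 10)
            ∨ (pvIdx longest axis - 10 ≤ pvIdx l (axis + 2) ∧ pvIdx l (axis + 2) ≤ pvIdx longest (axis + 2) + 10)))) := by
  intro xs
  induction xs with
  | nil => intro m r; simp
  | cons x t ih =>
    intro m r
    by_cases hx : x = longest
    · simp [pvPartStep, hx, ih, -Bool.decide_or, -Bool.decide_and, -decide_not]
    · by_cases hc : (pvIdx longest axis ≤ pvIdx x axis + 10 ∧ pvIdx x axis ≤ pvIdx longest (axis + 2) + 10)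
        ∨ (pvIdx longest axis ≤ pvIdx x (axis + 2) + 10 ∧ pvIdx x (axis + 2) ≤ pvIdx longest (axis + 2) + 10)
      · simp [pvPartStep, hx, hc, ih, -Bool.decide_or, -Bool.decide_and, -decide_not]
      · simp [pvPartStep, hx, hc, ih, -Bool.decide_or, -Bool.decide_and, -decide_not]

theorem pvFilter_lt_length {α : Type} {p : α → Bool} {xs : List α} {a : α} (h : a ∈ xs)
    (hp : p a = false) : (xs.filter p).length < xs.length := by
  rw [List.length_filter_lt_length_iff_exists]; exact ⟨a, h, by simp [hp]⟩

-- process_group (recursive, as in A)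
def pvProcA (axis : Int) (group : List (Int × Int × Int × Int)) : List (Int × Int × Int × Int) :=
  match h : PySem.List.max? group (fun l => |pvIdx l (2 + axis) - pvIdx l axis|) with
  | none => []  -- Python max raises on []; unreachable, groups are nonempty
  | some longest =>
    let mr := group.foldl (pvPartStep axis longest) ([], [])
    let result :=
      if mr.1 ≠ [] then
        let temp := mr.1.foldl (fun (t : Int × Int) m =>
          let t1 := if pvIdx m axis < t.1 then (pvIdx m axis, t.2) else t
          if pvIdx m (2 + axis) > t1.2 then (t1.1, pvIdx m (2 + axis)) else t1)
          (pvIdx longest axis, pvIdx longest (2 + axis))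
        if axis = 0 then
          [(temp.1, pvIdx longest (1 - axis), temp.2, pvIdx longest (1 - axis))]
        else
          [(pvIdx longest (1 - axis), temp.1, pvIdx longest (1 - axis), temp.2)]
      else []
    if mr.2 ≠ [] then result ++ pvProcA axis mr.2 else result
termination_by group.length
decreasing_by
  have hm := PySem.List.max?_mem h
  simp only [List.foldl_attach, pvPartStep_foldl]
  exact lt_of_le_of_lt (List.length_filter_le _ _) (pvFilter_lt_length hm (by simp))

-- the body of A's grouping loop (state: groups, current_group, last_center)
def pvGroupStep (axis threshold : Int)
    (st : List (List (Int × Int × Int × Int)) × List (Int × Int × Int × Int) × Option Int)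
    (line : Int × Int × Int × Int) :
    List (List (Int × Int × Int × Int)) × List (Int × Int × Int × Int) × Option Int :=
  let center := pvIdx line (1 - axis)
  let st' :=
    match st.2.2 with
    | some lc =>
      if |center - lc| > threshold then
        (if st.2.1 ≠ [] then (st.1 ++ [st.2.1], ([] : List (Int × Int × Int × Int)), st.2.2) else st)
      else st
    | none => st
  (st'.1, st'.2.1 ++ [line], some center)

def merge_similar_lines_and_choose_longest (lines : List (Int × Int × Int × Int)) (axis : Int) (threshold : Int) : List (Int × Int × Int × Int) :=
  if lines = [] then []
  else
    let sorted_lines := PySem.List.sorted lines (fun l => pvIdx l (1 - axis)) false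
    let st := sorted_lines.foldl (pvGroupStep axis threshold) ([], [], none)
    let groups := if st.2.1 ≠ [] then st.1 ++ [st.2.1] else st.1
    let merged_lines := groups.foldl (fun acc g => acc ++ pvProcA axis g) []
    merged_lines.foldl (fun acc l =>
      if axis = 0 then
        acc ++ [(l.1, PySem.Int.floordiv (l.2.1 + l.2.2.2) 2, l.2.2.1, PySem.Int.floordiv (l.2.1 + l.2.2.2) 2)]
      else if axis = 1 then
        acc ++ [(PySem.Int.floordiv (l.1 + l.2.2.1) 2, l.2.1, PySem.Int.floordiv (l.1 + l.2.2.1) 2, l.2.2.2)]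
      else acc) []

-- ===== PORT B =====

-- _groups: the inner index scan `while j < n and |s[j][c]-s[j-1][c]| <= threshold` ported as a
-- structural span over the same consecutive-gap test (same traversal, same comparisons)
def pvSpanB (c threshold : Int) : (Int × Int × Int × Int) → List (Int × Int × Int × Int) →
    List (Int × Int × Int × Int) × List (Int × Int × Int × Int)
  | _, [] => ([], [])
  | prev, x :: rest =>
    if |pvIdx x c - pvIdx prev c| ≤ threshold then
      let gr := pvSpanB c threshold x rest
      (x :: gr.1, gr.2)
    else ([], x :: rest)

theorem pvSpanB_len (c threshold : Int) :
    ∀ (prev : Int × Int × Int × Int) (xs : List (Int × Int × Int × Int)),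
    (pvSpanB c threshold prev xs).2.length ≤ xs.length := by
  intro prev xs
  induction xs generalizing prev with
  | nil => simp [pvSpanB]
  | cons x t ih =>
    rw [pvSpanB]
    split
    · exact le_trans (ih x) (by simp)
    · simp

def pvGroupsB (c threshold : Int) : List (Int × Int × Int × Int) → List (List (Int × Int × Int × Int))
  | [] => []
  | x :: rest =>
    let gr := pvSpanB c threshold x rest
    (x :: gr.1) :: pvGroupsB c threshold gr.2
termination_by xs => xs.length
decreasing_by
  have := pvSpanB_len c threshold x rest
  simp
  omega

-- the iterative worklist of B's `while work:` loop (out is the growing result list)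
def pvProcB (axis : Int) (work out : List (Int × Int × Int × Int)) : List (Int × Int × Int × Int) :=
  match h : PySem.List.max? work (fun l => |pvIdx l (2 + axis) - pvIdx l axis|) with
  | none => out  -- work == [] : the while loop stops
  | some seed =>
    let others := work.filter (fun l => l ≠ seed)
    let lo := pvIdx seed axis
    let hi := pvIdx seed (2 + axis)
    let merged := others.filter (fun l =>
      decide ((lo - 10 ≤ pvIdx l axis ∧ pvIdx l axis ≤ hi + 10)
        ∨ (lo - 10 ≤ pvIdx l (axis + 2) ∧ pvIdx l (axis + 2) ≤ hi + 10)))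
    let out' :=
      if merged ≠ [] then
        -- min([lo]+…) / max([hi]+…) on a nonempty list: the default 0 is never used
        let a := PySem.List.minD (lo :: merged.map (fun l => pvIdx l axis)) (fun x => x) 0
        let b := PySem.List.maxD (hi :: merged.map (fun l => pvIdx l (2 + axis))) (fun x => x) 0
        let m := pvIdx seed (1 - axis)
        out ++ [if axis = 0 then (a, m, b, m) else (m, a, m, b)]
      else out
    pvProcB axis (others.filter (fun l =>
      !decide ((lo - 10 ≤ pvIdx l axis ∧ pvIdx l axis ≤ hi + 10)
        ∨ (lo - 10 ≤ pvIdx l (axis + 2) ∧ pvIdx l (axis + 2) ≤ hi + 10)))) out'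
termination_by work.length
decreasing_by
  have hm := PySem.List.max?_mem h
  simp
  have huna : (List.filter (fun x => !decide ((x : {x // x ∈ work}).1 = seed)) work.attach).unattach
      = work.attach.unattach.filter (fun l => !decide (l = seed)) :=
    List.unattach_filter (hf := fun _ _ => rfl)
  rw [List.unattach_attach] at huna
  rw [huna]
  exact lt_of_le_of_lt (List.length_filter_le _ _) (pvFilter_lt_length hm (by simp))

def merge_similar_lines_and_choose_longest_alt (lines : List (Int × Int × Int × Int)) (axis : Int) (threshold : Int) : List (Int × Int × Int × Int) :=
  if lines = [] then []
  else
    let c := 1 - axis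
    (pvGroupsB c threshold (PySem.List.sorted lines (fun l => pvIdx l c) false)).foldl
      (fun out g => pvProcB axis g out) []

-- ===== PRECONDITION & SPEC =====
-- Pre_ keeps the natural domain of the axis selector: axis ∈ {0,1} (or no lines at all).
-- For any other axis A either raises IndexError (axis ≥ 2 or axis ≤ -3 indexes past the
-- 4-tuples) or, for axis ∈ {-2,-1}, returns [] only through negative-index wraparound and the
-- fall-through of the final if axis==0/elif axis==1 — an accident outside the selector's domain.
def Pre_merge_similar_lines_and_choose_longest (lines : List (Int × Int × Int × Int)) (axis : Int) (threshold : Int) : Prop :=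
  lines = [] ∨ axis = 0 ∨ axis = 1
instance (lines : List (Int × Int × Int × Int)) (axis : Int) (threshold : Int) : Decidable (Pre_merge_similar_lines_and_choose_longest lines axis threshold) := by unfold Pre_merge_similar_lines_and_choose_longest; infer_instance

def pvWitness_merge_similar_lines_and_choose_longest : (List (Int × Int × Int × Int)) × Int × Int :=
  ([(0, 0, 1, 0), (0, 0, 2, 0), (0, 30, 5, 30)], 0, 10)

def Spec_merge_similar_lines_and_choose_longest (lines : List (Int × Int × Int × Int)) (axis : Int) (threshold : Int) (out : List (Int × Int × Int × Int)) : Prop := out = merge_similar_lines_and_choose_longest_alt lines axis threshold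
instance (lines : List (Int × Int × Int × Int)) (axis : Int) (threshold : Int) (out : List (Int × Int × Int × Int)) : Decidable (Spec_merge_similar_lines_and_choose_longest lines axis threshold out) := by unfold Spec_merge_similar_lines_and_choose_longest; infer_instance

-- ===== CLAIM (what is proved, stated in full; the proofs are below) =====
def Claim_equal_merge_similar_lines_and_choose_longest : Prop := ∀ (lines : List (Int × Int × Int × Int)) (axis : Int) (threshold : Int), Dom_merge_similar_lines_and_choose_longest lines axis threshold → Pre_merge_similar_lines_and_choose_longest lines axis threshold → Spec_merge_similar_lines_and_choose_longest lines axis threshold (merge_similar_lines_and_choose_longest lines axis threshold)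

-- ===== LEMMAS AND PROOFS =====

theorem pvProcB_nil (axis : Int) (out : List (Int × Int × Int × Int)) : pvProcB axis [] out = out := by
  rw [pvProcB]; simp [PySem.List.max?]

-- A's temp-update loop computes the running min of line[axis] and running max of line[2+axis]
theorem pvTempFold (axis : Int) :
    ∀ (xs : List (Int × Int × Int × Int)) (lo hi : Int),
    xs.foldl (fun (t : Int × Int) m =>
        let t1 := if pvIdx m axis < t.1 then (pvIdx m axis, t.2) else t
        if pvIdx m (2 + axis) > t1.2 then (t1.1, pvIdx m (2 + axis)) else t1) (lo, hi)
      = ((xs.map (fun l => pvIdx l axis)).foldl min lo,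
         (xs.map (fun l => pvIdx l (2 + axis))).foldl max hi) := by
  intro xs
  induction xs with
  | nil => intro lo hi; simp
  | cons x t ih =>
    intro lo hi
    simp only [List.foldl_cons, List.map_cons]
    rw [show (let t1 := if pvIdx x axis < (lo, hi).1 then (pvIdx x axis, (lo, hi).2) else (lo, hi)
          if pvIdx x (2 + axis) > t1.2 then (t1.1, pvIdx x (2 + axis)) else t1)
        = (min lo (pvIdx x axis), max hi (pvIdx x (2 + axis))) by
      simp only []
      by_cases h1 : pvIdx x axis < lo <;> by_cases h2 : pvIdx x (2 + axis) > hi <;>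
        simp [h1, h2, min_def, max_def] <;> omega]
    exact ih _ _

-- the worklist loop only appends to `out`
theorem pvProcB_append (axis : Int) :
    ∀ (n : Nat) (work out : List (Int × Int × Int × Int)), work.length ≤ n →
    pvProcB axis work out = out ++ pvProcB axis work [] := by
  intro n
  induction n with
  | zero =>
    intro work out h
    have hw : work = [] := List.length_eq_zero_iff.mp (Nat.le_zero.mp h)
    simp [hw, pvProcB_nil]
  | succ n ih =>
    intro work out h
    rw [pvProcB.eq_def]
    conv_rhs => rw [pvProcB.eq_def]
    cases hmax : PySem.List.max? work (fun l => |pvIdx l (2 + axis) - pvIdx l axis|) with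
    | none => simp
    | some seed =>
      simp only []
      have hm := PySem.List.max?_mem hmax
      have hlen : ((work.filter (fun l => decide (l ≠ seed))).filter (fun l =>
          !decide ((pvIdx seed axis - 10 ≤ pvIdx l axis ∧ pvIdx l axis ≤ pvIdx seed (2 + axis) + 10)
            ∨ (pvIdx seed axis - 10 ≤ pvIdx l (axis + 2) ∧ pvIdx l (axis + 2) ≤ pvIdx seed (2 + axis) + 10)))).length ≤ n := by
        have h1 := pvFilter_lt_length (p := fun l => decide (l ≠ seed)) hm (by simp)
        have h2 := List.length_filter_le (fun l =>
          !decide ((pvIdx seed axis - 10 ≤ pvIdx l axis ∧ pvIdx l axis ≤ pvIdx seed (2 + axis) + 10)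
            ∨ (pvIdx seed axis - 10 ≤ pvIdx l (axis + 2) ∧ pvIdx l (axis + 2) ≤ pvIdx seed (2 + axis) + 10)))
          (work.filter (fun l => decide (l ≠ seed)))
        omega
      rw [ih _ _ hlen, ih _ _ hlen]
      split_ifs <;> simp
      all_goals conv_rhs => rw [ih _ _ (by simpa using hlen)]
      all_goals simp

-- per group, A's recursive process_group followed by straightening = B's worklist loop (axis = 0)
theorem pvProc_eq0 :
    ∀ (g : List (Int × Int × Int × Int)),
    (pvProcA 0 g).map (fun l => (l.1, PySem.Int.floordiv (l.2.1 + l.2.2.2) 2, l.2.2.1,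
        PySem.Int.floordiv (l.2.1 + l.2.2.2) 2)) = pvProcB 0 g [] := by
  intro g
  induction hn : g.length using Nat.strong_induction_on generalizing g with
  | _ n ih =>
  subst hn
  rw [pvProcA.eq_def, pvProcB.eq_def]
  cases hmax : PySem.List.max? g (fun l => |pvIdx l (2 + (0 : Int)) - pvIdx l (0 : Int)|) with
  | none => simp
  | some longest =>
    have hm := PySem.List.max?_mem hmax
    simp only []
    rw [pvPartStep_foldl, pvTempFold]
    simp only [show (0 : Int) + 2 = 2 by norm_num, show (2 : Int) + 0 = 2 by norm_num,
      show (1 : Int) - 0 = 1 by norm_num, List.nil_append, if_true]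
    set R := List.filter (fun l =>
        !decide (pvIdx longest 0 - 10 ≤ pvIdx l 0 ∧ pvIdx l 0 ≤ pvIdx longest 2 + 10 ∨
          pvIdx longest 0 - 10 ≤ pvIdx l 2 ∧ pvIdx l 2 ≤ pvIdx longest 2 + 10))
        (List.filter (fun l => decide (l ≠ longest)) g) with hR
    set M := List.filter (fun l =>
        decide (pvIdx longest 0 - 10 ≤ pvIdx l 0 ∧ pvIdx l 0 ≤ pvIdx longest 2 + 10 ∨
          pvIdx longest 0 - 10 ≤ pvIdx l 2 ∧ pvIdx l 2 ≤ pvIdx longest 2 + 10))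
        (List.filter (fun l => decide (l ≠ longest)) g) with hM
    have hRlt : R.length < g.length := by
      rw [hR]
      exact lt_of_le_of_lt (List.length_filter_le _ _) (pvFilter_lt_length hm (by simp))
    by_cases hrem : R ≠ []
    · rw [if_pos hrem]
      by_cases hmg : M ≠ []
      · rw [if_pos hmg, if_pos hmg, List.map_append, ih R.length hRlt R rfl]
        conv_rhs => rw [pvProcB_append 0 R.length R _ le_rfl]
        have h2 : ∀ c : Int, (c + c) / 2 = c := fun c => by omega
        simp [h2, PySem.List.minD, PySem.List.min?_id_cons,
          PySem.List.maxD, PySem.List.max?_id_cons]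
      · rw [if_neg hmg, if_neg hmg, List.nil_append, ih R.length hRlt R rfl]
    · rw [if_neg hrem]
      have hRe : R = [] := not_not.mp hrem
      rw [hRe, pvProcB_nil]
      by_cases hmg : M ≠ []
      · rw [if_pos hmg, if_pos hmg]
        have h2 : ∀ c : Int, (c + c) / 2 = c := fun c => by omega
        simp [h2, PySem.List.minD, PySem.List.min?_id_cons,
          PySem.List.maxD, PySem.List.max?_id_cons]
      · rw [if_neg hmg, if_neg hmg]; simp

-- per group, the same for axis = 1
theorem pvProc_eq1 :
    ∀ (g : List (Int × Int × Int × Int)),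
    (pvProcA 1 g).map (fun l => (PySem.Int.floordiv (l.1 + l.2.2.1) 2, l.2.1,
        PySem.Int.floordiv (l.1 + l.2.2.1) 2, l.2.2.2)) = pvProcB 1 g [] := by
  intro g
  induction hn : g.length using Nat.strong_induction_on generalizing g with
  | _ n ih =>
  subst hn
  rw [pvProcA.eq_def, pvProcB.eq_def]
  cases hmax : PySem.List.max? g (fun l => |pvIdx l (2 + (1 : Int)) - pvIdx l (1 : Int)|) with
  | none => simp
  | some longest =>
    have hm := PySem.List.max?_mem hmax
    simp only []
    rw [pvPartStep_foldl, pvTempFold]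
    simp only [show (1 : Int) + 2 = 3 by norm_num, show (2 : Int) + 1 = 3 by norm_num,
      show (1 : Int) - 1 = 0 by norm_num, List.nil_append,
      if_neg (show ¬(1 : Int) = 0 by norm_num)]
    set R := List.filter (fun l =>
        !decide (pvIdx longest 1 - 10 ≤ pvIdx l 1 ∧ pvIdx l 1 ≤ pvIdx longest 3 + 10 ∨
          pvIdx longest 1 - 10 ≤ pvIdx l 3 ∧ pvIdx l 3 ≤ pvIdx longest 3 + 10))
        (List.filter (fun l => decide (l ≠ longest)) g) with hR
    set M := List.filter (fun l =>
        decide (pvIdx longest 1 - 10 ≤ pvIdx l 1 ∧ pvIdx l 1 ≤ pvIdx longest 3 + 10 ∨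
          pvIdx longest 1 - 10 ≤ pvIdx l 3 ∧ pvIdx l 3 ≤ pvIdx longest 3 + 10))
        (List.filter (fun l => decide (l ≠ longest)) g) with hM
    have hRlt : R.length < g.length := by
      rw [hR]
      exact lt_of_le_of_lt (List.length_filter_le _ _) (pvFilter_lt_length hm (by simp))
    by_cases hrem : R ≠ []
    · rw [if_pos hrem]
      by_cases hmg : M ≠ []
      · rw [if_pos hmg, if_pos hmg, List.map_append, ih R.length hRlt R rfl]
        conv_rhs => rw [pvProcB_append 1 R.length R _ le_rfl]
        have h2 : ∀ c : Int, (c + c) / 2 = c := fun c => by omega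
        simp [h2, PySem.List.minD, PySem.List.min?_id_cons,
          PySem.List.maxD, PySem.List.max?_id_cons]
      · rw [if_neg hmg, if_neg hmg, List.nil_append, ih R.length hRlt R rfl]
    · rw [if_neg hrem]
      have hRe : R = [] := not_not.mp hrem
      rw [hRe, pvProcB_nil]
      by_cases hmg : M ≠ []
      · rw [if_pos hmg, if_pos hmg]
        have h2 : ∀ c : Int, (c + c) / 2 = c := fun c => by omega
        simp [h2, PySem.List.minD, PySem.List.min?_id_cons,
          PySem.List.maxD, PySem.List.max?_id_cons]
      · rw [if_neg hmg, if_neg hmg]; simp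

-- unfolding equations for the span and for pvGroupsB on a cons
theorem pvSpanB_cons_le (c threshold : Int) (prev x : Int × Int × Int × Int)
    (rest : List (Int × Int × Int × Int)) (h : |pvIdx x c - pvIdx prev c| ≤ threshold) :
    pvSpanB c threshold prev (x :: rest)
      = (x :: (pvSpanB c threshold x rest).1, (pvSpanB c threshold x rest).2) := by
  simp [pvSpanB, h]

theorem pvSpanB_cons_gt (c threshold : Int) (prev x : Int × Int × Int × Int)
    (rest : List (Int × Int × Int × Int)) (h : ¬ |pvIdx x c - pvIdx prev c| ≤ threshold) :
    pvSpanB c threshold prev (x :: rest) = ([], x :: rest) := by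
  simp [pvSpanB, h]

theorem pvGroupsB_cons (c threshold : Int) (x : Int × Int × Int × Int)
    (rest : List (Int × Int × Int × Int)) :
    pvGroupsB c threshold (x :: rest)
      = (x :: (pvSpanB c threshold x rest).1)
          :: pvGroupsB c threshold (pvSpanB c threshold x rest).2 := by
  rw [pvGroupsB]

-- A's flush-on-gap grouping fold = B's span-based peeling, given the running invariant
theorem pvGroupFold (axis threshold : Int) :
    ∀ (xs : List (Int × Int × Int × Int)) (gs : List (List (Int × Int × Int × Int)))
      (cur : List (Int × Int × Int × Int)) (prev : Int × Int × Int × Int), cur ≠ [] →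
    (if (xs.foldl (pvGroupStep axis threshold) (gs, cur, some (pvIdx prev (1 - axis)))).2.1 ≠ []
     then (xs.foldl (pvGroupStep axis threshold) (gs, cur, some (pvIdx prev (1 - axis)))).1
            ++ [(xs.foldl (pvGroupStep axis threshold) (gs, cur, some (pvIdx prev (1 - axis)))).2.1]
     else (xs.foldl (pvGroupStep axis threshold) (gs, cur, some (pvIdx prev (1 - axis)))).1)
      = gs ++ ((cur ++ (pvSpanB (1 - axis) threshold prev xs).1)
          :: pvGroupsB (1 - axis) threshold (pvSpanB (1 - axis) threshold prev xs).2) := by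
  intro xs
  induction xs with
  | nil => intro gs cur prev hcur; simp [pvSpanB, pvGroupsB, hcur]
  | cons x t ihx =>
    intro gs cur prev hcur
    simp only [List.foldl_cons]
    by_cases hgap : |pvIdx x (1 - axis) - pvIdx prev (1 - axis)| > threshold
    · rw [show pvGroupStep axis threshold (gs, cur, some (pvIdx prev (1 - axis))) x
          = (gs ++ [cur], [x], some (pvIdx x (1 - axis))) from by
        simp [pvGroupStep, hcur, hgap]]
      rw [ihx (gs ++ [cur]) [x] x (by simp),
        pvSpanB_cons_gt _ _ _ _ _ (not_le.mpr hgap), pvGroupsB_cons]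
      simp
    · rw [show pvGroupStep axis threshold (gs, cur, some (pvIdx prev (1 - axis))) x
          = (gs, cur ++ [x], some (pvIdx x (1 - axis))) from by
        simp [pvGroupStep, hgap]]
      rw [ihx gs (cur ++ [x]) x (by simp),
        pvSpanB_cons_le _ _ _ _ _ (not_lt.mp hgap)]
      simp

theorem pvGroups_eq (axis threshold : Int) (s : List (Int × Int × Int × Int)) (hs : s ≠ []) :
    (if (s.foldl (pvGroupStep axis threshold) ([], [], none)).2.1 ≠ []
     then (s.foldl (pvGroupStep axis threshold) ([], [], none)).1
            ++ [(s.foldl (pvGroupStep axis threshold) ([], [], none)).2.1]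
     else (s.foldl (pvGroupStep axis threshold) ([], [], none)).1)
      = pvGroupsB (1 - axis) threshold s := by
  obtain ⟨x, xs, rfl⟩ := List.exists_cons_of_ne_nil hs
  simp only [List.foldl_cons]
  rw [show pvGroupStep axis threshold ([], [], none) x
      = ([], [x], some (pvIdx x (1 - axis))) from by simp [pvGroupStep]]
  rw [pvGroupFold axis threshold xs [] [x] x (by simp), pvGroupsB_cons]
  simp

-- B's outer loop over the groups accumulates the per-group results in order
theorem pvFoldProcB (axis : Int) :
    ∀ (gs : List (List (Int × Int × Int × Int))) (out : List (Int × Int × Int × Int)),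
    gs.foldl (fun out g => pvProcB axis g out) out
      = out ++ (gs.flatMap (fun g => pvProcB axis g [])) := by
  intro gs
  induction gs with
  | nil => intro out; simp
  | cons g t ih =>
    intro out
    rw [List.foldl_cons, ih, pvProcB_append axis g.length g out le_rfl,
      List.flatMap_cons, List.append_assoc]

-- ===== VERDICT (by name: the statement is the Claim_ definition above) =====
theorem merge_similar_lines_and_choose_longest_spec : Claim_equal_merge_similar_lines_and_choose_longest := by
  intro lines axis threshold hdom hpre
  unfold Spec_merge_similar_lines_and_choose_longest
  by_cases hl : lines = []
  · simp [merge_similar_lines_and_choose_longest, merge_similar_lines_and_choose_longest_alt, hl]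
  · have hax : axis = 0 ∨ axis = 1 := by
      rcases hpre with h | h | h
      · exact absurd h hl
      · exact Or.inl h
      · exact Or.inr h
    have hs : PySem.List.sorted lines (fun l => pvIdx l (1 - axis)) false ≠ [] := by
      rw [Ne, PySem.List.sorted_eq_nil_iff]; exact hl
    rcases hax with rfl | rfl
    · rw [merge_similar_lines_and_choose_longest, merge_similar_lines_and_choose_longest_alt,
        if_neg hl, if_neg hl]
      simp only []
      rw [pvGroups_eq 0 threshold _ hs, PySem.List.foldl_append_eq_flatMap]
      simp only [List.nil_append, if_true]
      rw [PySem.List.foldl_append_singleton_eq_map]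
      simp only [List.nil_append]
      rw [List.map_flatMap, pvFoldProcB 0]
      simp only [List.nil_append, pvProc_eq0]
    · rw [merge_similar_lines_and_choose_longest, merge_similar_lines_and_choose_longest_alt,
        if_neg hl, if_neg hl]
      simp only []
      rw [pvGroups_eq 1 threshold _ hs, PySem.List.foldl_append_eq_flatMap]
      simp only [List.nil_append, show ((1 : Int) = 0) = False by norm_num, if_false, if_true]
      rw [PySem.List.foldl_append_singleton_eq_map]
      simp only [List.nil_append]
      rw [List.map_flatMap, pvFoldProcB 1]
      simp only [List.nil_append, pvProc_eq1]
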